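-- pv_equiv track=rewrite | github.com/Demonware/bladerunner | bladerunner/networking.py | _ip_to_binary
-- ===== SOURCE A (Python) =====
-- def _quadrant_to_binary(quadrant):
--     """Convert a single quandrant to a binary string."""
--
--     ip_as_int = int(str(quadrant))
--     if 0 <= ip_as_int <= 255:
--         return bin(ip_as_int)[2:].rjust(8, str(0))
--
-- def _ip_to_binary(ip_addr):
--     """Convert a dotted quad IP address to a binary string representation."""
--
--     full_binary = []
--     for quadrant in ip_addr.split("."):
--         quad_binary = _quadrant_to_binary(quadrant)
--
--         if not quad_binary:
--             return None
--
--         full_binary.append(quad_binary)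
--
--     return "{0:b}".format(int("".join(full_binary), 2)).rjust(32, str(0))
-- ===== SOURCE B (Python) =====
-- def _ip_to_binary(ip_addr):
--     """Convert a dotted quad IP address to a binary string representation."""
--
--     value = 0
--     for quadrant in ip_addr.split("."):
--         n = int(quadrant)
--         if not 0 <= n <= 255:
--             return None
--         value = value * 256 + n
--     return "{0:b}".format(value).rjust(32, "0")
-- ===== Notes on version B (the rewrite author's own statement) =====
-- stated objective: simpler
-- what changed: B accumulates the 32-bit value arithmetically (value = value*256 + n) in one pass and formats once, instead of building an 8-bit binary string per quadrant, joining, and re-parsing the joined string back to an int before formatting; no helper function and no string round-trip.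
import Mathlib
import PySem

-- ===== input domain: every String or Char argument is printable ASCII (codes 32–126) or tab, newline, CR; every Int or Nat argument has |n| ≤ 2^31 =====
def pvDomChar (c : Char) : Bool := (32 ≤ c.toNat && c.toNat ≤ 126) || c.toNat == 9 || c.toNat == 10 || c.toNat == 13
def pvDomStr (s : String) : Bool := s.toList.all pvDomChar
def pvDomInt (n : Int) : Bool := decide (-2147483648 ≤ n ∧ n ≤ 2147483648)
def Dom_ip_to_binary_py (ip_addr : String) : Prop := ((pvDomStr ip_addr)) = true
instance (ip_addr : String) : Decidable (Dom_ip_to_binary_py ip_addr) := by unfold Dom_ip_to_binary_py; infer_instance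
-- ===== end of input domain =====

-- B replaces A's per-quadrant binary-string building, join and re-parse by a single
-- arithmetic accumulation (value = value*256 + n) followed by one format; not faster, simpler.

-- ===== PORT A =====

-- s.rjust(w, "0") (the strings here never start with '-', so plain left-padding is exact)
def pvRjust (w : Nat) (l : List Char) : List Char := List.replicate (w - l.length) '0' ++ l

-- int(s, 2): exact on nonempty lists of '0'/'1' digit characters, which is the only
-- kind of string A ever feeds it ("".join of the 8-bit blocks of at least one quadrant)
def pvBitsVal (l : List Char) : Nat := l.foldl (fun a c => 2 * a + (if c = '1' then 1 else 0)) 0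

-- _quadrant_to_binary: bin(n)[2:] for n ≥ 0 is PySem.Int.toBinChars n; falling off = none.
-- ofStr? q = none is where Python's int(q) raises ValueError (excluded by Pre_).
def pvQuadToBinary (q : List Char) : Option (List Char) :=
  match PySem.Int.ofChars? q with
  | none => none
  | some n => if 0 ≤ n ∧ n ≤ 255 then some (pvRjust 8 (PySem.Int.toBinChars n)) else none

-- the for-loop of _ip_to_binary, appending each block, early None
def pvALoop : List (List Char) → List (List Char) → Option (List (List Char))
  | [], acc => some acc
  | q :: rest, acc =>
    match pvQuadToBinary q with
    | none => none
    | some b => pvALoop rest (acc ++ [b])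

def ip_to_binary_py (ip_addr : String) : Option String :=
  match pvALoop (PySem.Chars.splitOn ip_addr.toList ['.']) [] with
  | none => none
  | some full_binary =>
      -- "".join(full_binary) is concatenation; then int(·, 2), format(·, 'b'), rjust(32, "0")
      some (String.ofList (pvRjust 32 (PySem.Int.toBinChars ((pvBitsVal full_binary.flatten : Nat) : Int))))

-- ===== PORT B =====

-- B's loop: value = value*256 + n, early None when a quadrant is out of range
def pvBLoop : List (List Char) → Int → Option Int
  | [], value => some value
  | q :: rest, value =>
    match PySem.Int.ofChars? q with
    | none => none
    | some n => if 0 ≤ n ∧ n ≤ 255 then pvBLoop rest (value * 256 + n) else none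

def ip_to_binary_py_alt (ip_addr : String) : Option String :=
  match pvBLoop (PySem.Chars.splitOn ip_addr.toList ['.']) 0 with
  | none => none
  | some value => some (String.ofList (pvRjust 32 (PySem.Int.toBinChars value)))

-- ===== PRECONDITION & SPEC =====
-- Pre_ excludes exactly the inputs on which Python's int(quadrant) raises ValueError
-- (a quadrant that is not an int literal, e.g. "" or "x"); A raises there, it never returns.
def Pre_ip_to_binary_py (ip_addr : String) : Prop :=
  ((PySem.Chars.splitOn ip_addr.toList ['.']).all (fun q => (PySem.Int.ofChars? q).isSome)) = true
instance (ip_addr : String) : Decidable (Pre_ip_to_binary_py ip_addr) := by unfold Pre_ip_to_binary_py; infer_instance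
def pvWitness_ip_to_binary_py : String := "1.2.3.4"

def Spec_ip_to_binary_py (ip_addr : String) (out : Option String) : Prop := out = ip_to_binary_py_alt ip_addr
instance (ip_addr : String) (out : Option String) : Decidable (Spec_ip_to_binary_py ip_addr out) := by unfold Spec_ip_to_binary_py; infer_instance

-- ===== CLAIM (what is proved, stated in full; the proofs are below) =====
def Claim_equal_ip_to_binary_py : Prop := ∀ (ip_addr : String), Dom_ip_to_binary_py ip_addr → Pre_ip_to_binary_py ip_addr → Spec_ip_to_binary_py ip_addr (ip_to_binary_py ip_addr)

-- ===== LEMMAS AND PROOFS =====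

-- folding pvBitsVal's step from an arbitrary start
theorem pvBitsVal_foldl (l : List Char) : ∀ (x : Nat),
    l.foldl (fun a c => 2 * a + (if c = '1' then 1 else 0)) x
      = x * 2 ^ l.length + pvBitsVal l := by
  induction l with
  | nil => intro x; simp [pvBitsVal]
  | cons c t ih =>
      intro x
      rw [List.foldl_cons, ih, List.length_cons]
      have h2 : pvBitsVal (c :: t) = (if c = '1' then 1 else 0) * 2 ^ t.length + pvBitsVal t := by
        unfold pvBitsVal
        rw [List.foldl_cons, ih]
        simp [pvBitsVal]
      rw [h2]
      ring

theorem pvBitsVal_append (a b : List Char) :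
    pvBitsVal (a ++ b) = pvBitsVal a * 2 ^ b.length + pvBitsVal b := by
  unfold pvBitsVal
  rw [List.foldl_append, pvBitsVal_foldl]
  rfl

-- each 8-bit block round-trips: value and length (256 small cases)
set_option maxRecDepth 8192 in
theorem pvQuadBits : ∀ n : Nat, n < 256 →
    pvBitsVal (pvRjust 8 (PySem.Int.toBinChars (n : Int))) = n ∧
    (pvRjust 8 (PySem.Int.toBinChars (n : Int))).length = 8 := by decide

-- loop invariant: B's running value is the parse of A's joined blocks
theorem pvLoop_agree : ∀ (quads : List (List Char)) (acc : List (List Char)),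
    pvBLoop quads ((pvBitsVal acc.flatten : Nat) : Int)
      = (pvALoop quads acc).map (fun ps => ((pvBitsVal ps.flatten : Nat) : Int)) := by
  intro quads
  induction quads with
  | nil => intro acc; simp [pvBLoop, pvALoop]
  | cons q rest ih =>
      intro acc
      simp only [pvBLoop, pvALoop, pvQuadToBinary]
      cases h : PySem.Int.ofChars? q with
      | none => simp
      | some n =>
          by_cases hr : 0 ≤ n ∧ n ≤ 255
          · simp only [if_pos hr]
            have hn : n = ((n.toNat : Nat) : Int) := (Int.toNat_of_nonneg hr.1).symm
            have hlt : n.toNat < 256 := by omega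
            obtain ⟨hv, hl⟩ := pvQuadBits n.toNat hlt
            have hflat : pvBitsVal ((acc ++ [pvRjust 8 (PySem.Int.toBinChars n)]).flatten)
                = pvBitsVal acc.flatten * 256 + n.toNat := by
              rw [List.flatten_append, List.flatten_cons, List.flatten_nil, List.append_nil,
                  pvBitsVal_append, hn, hl, hv, Int.toNat_natCast]
              norm_num
            rw [← ih]
            congr 1
            rw [hflat]
            push_cast [Int.toNat_of_nonneg hr.1]
            ring
          · simp [if_neg hr]

-- ===== VERDICT (by name: the statement is the Claim_ definition above) =====
theorem ip_to_binary_py_spec : Claim_equal_ip_to_binary_py := by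
  intro ip_addr _ _
  unfold Spec_ip_to_binary_py ip_to_binary_py ip_to_binary_py_alt
  have h := pvLoop_agree (PySem.Chars.splitOn ip_addr.toList ['.']) []
  simp only [List.flatten_nil, pvBitsVal, List.foldl_nil, Nat.cast_zero] at h
  rw [h]
  cases pvALoop (PySem.Chars.splitOn ip_addr.toList ['.']) [] <;> simp [pvBitsVal]
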